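-- pv_equiv track=rewrite | github.com/cisco-ai-defense/defenseclaw | scripts/docs_verify.py | _logical_lines
-- ===== SOURCE A (Python) =====
-- from typing import Iterable
--
-- def _logical_lines(block: str) -> Iterable[str]:
--     current = ""
--     for raw in block.splitlines():
--         line = raw.strip()
--         if not line or line.startswith("#"):
--             continue
--         if "#" in line:
--             line = line.split("#", 1)[0].rstrip()
--         if line.endswith("\\"):
--             current += line[:-1] + " "
--             continue
--         yield (current + line).strip()
--         current = ""
--     if current.strip():
--         yield current.strip()
-- ===== SOURCE B (Python) =====
-- def _assemble(lines, cur):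
--     # Recursively join backslash continuations, building the result front-to-back.
--     if not lines:
--         return [cur.strip()] if cur.strip() else []
--     head, rest = lines[0], lines[1:]
--     if head.endswith("\\"):
--         return _assemble(rest, cur + head[:-1] + " ")
--     return [(cur + head).strip()] + _assemble(rest, "")
--
-- def _logical_lines(block: str):
--     cleaned = []
--     for raw in block.splitlines():
--         s = raw.strip()
--         if s and not s.startswith("#"):
--             cleaned.append(s.split("#", 1)[0].rstrip() if "#" in s else s)
--     return _assemble(cleaned, "")
-- ===== Notes on version B (the rewrite author's own statement) =====
-- stated objective: alternative
-- what changed: Replaces A's single interleaved generator loop by a two-stage decomposition: a cleaning pass produces the list of stripped, comment-free lines, and a separate recursive function then joins backslash continuations, building the output list front-to-back by consing instead of appending to an accumulator.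
import Mathlib
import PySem

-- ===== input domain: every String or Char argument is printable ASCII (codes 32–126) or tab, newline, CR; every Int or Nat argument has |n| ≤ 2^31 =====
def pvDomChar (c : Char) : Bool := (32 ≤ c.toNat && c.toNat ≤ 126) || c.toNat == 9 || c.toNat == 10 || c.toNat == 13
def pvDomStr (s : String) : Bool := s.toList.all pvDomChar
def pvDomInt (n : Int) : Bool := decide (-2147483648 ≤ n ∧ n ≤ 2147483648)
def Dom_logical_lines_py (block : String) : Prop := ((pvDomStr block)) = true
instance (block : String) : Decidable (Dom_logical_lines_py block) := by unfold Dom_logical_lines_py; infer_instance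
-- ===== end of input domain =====

-- B replaces A's single interleaved loop by a cleaning pass plus a recursive continuation-joining
-- function that builds the output front-to-back; same cost, no speed claim.

-- ===== PORT A =====
def logical_lines_py (block : String) : List String :=
  let res := (PySem.Chars.splitlines block.toList).foldl
    (fun (st : List Char × List String) raw =>
      let current := st.1
      let line := PySem.Chars.strip raw
      if line = [] ∨ PySem.Chars.startswith line ['#'] = true then st
      else
        let line := if PySem.Chars.isIn ['#'] line = true then
            PySem.Chars.rstrip (PySem.List.pyGetD (PySem.Chars.splitOnMax line ['#'] 1) 0 [])
          else line
        if PySem.Chars.endswith line ['\\'] = true then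
          (current ++ PySem.List.slice line none (some (-1)) ++ [' '], st.2)
        else ([], st.2 ++ [String.ofList (PySem.Chars.strip (current ++ line))]))
    ([], [])
  if PySem.Chars.strip res.1 ≠ [] then res.2 ++ [String.ofList (PySem.Chars.strip res.1)] else res.2

-- ===== PORT B =====
-- Recursive joiner: consumes cleaned lines, conses finished logical lines onto the result.
def pvAssemble : List (List Char) → List Char → List String
  | [], cur => if PySem.Chars.strip cur ≠ [] then [String.ofList (PySem.Chars.strip cur)] else []
  | head :: rest, cur =>
    if PySem.Chars.endswith head ['\\'] = true then
      pvAssemble rest (cur ++ PySem.List.slice head none (some (-1)) ++ [' '])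
    else String.ofList (PySem.Chars.strip (cur ++ head)) :: pvAssemble rest []

-- Cleaning pass of B: keep stripped, non-blank, non-comment lines with inline comments cut.
def pvCleanPass : List (List Char) → List (List Char)
  | [] => []
  | raw :: rest =>
    let s := PySem.Chars.strip raw
    if ¬ (s = []) ∧ ¬ (PySem.Chars.startswith s ['#'] = true) then
      (if PySem.Chars.isIn ['#'] s = true then
        PySem.Chars.rstrip (PySem.List.pyGetD (PySem.Chars.splitOnMax s ['#'] 1) 0 [])
      else s) :: pvCleanPass rest
    else pvCleanPass rest

def logical_lines_py_alt (block : String) : List String :=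
  pvAssemble (pvCleanPass (PySem.Chars.splitlines block.toList)) []

-- ===== PRECONDITION & SPEC =====
def Spec_logical_lines_py (block : String) (out : List String) : Prop := out = logical_lines_py_alt block
instance (block : String) (out : List String) : Decidable (Spec_logical_lines_py block out) := by unfold Spec_logical_lines_py; infer_instance

-- ===== CLAIM (what is proved, stated in full; the proofs are below) =====
def Claim_equal_logical_lines_py : Prop := ∀ (block : String), Dom_logical_lines_py block → Spec_logical_lines_py block (logical_lines_py block)

-- ===== LEMMAS AND PROOFS =====

-- A's loop step, as a named function (proof-only helper; defeq to the lambda in logical_lines_py).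
def pvAStep (st : List Char × List String) (raw : List Char) : List Char × List String :=
  let current := st.1
  let line := PySem.Chars.strip raw
  if line = [] ∨ PySem.Chars.startswith line ['#'] = true then st
  else
    let line := if PySem.Chars.isIn ['#'] line = true then
        PySem.Chars.rstrip (PySem.List.pyGetD (PySem.Chars.splitOnMax line ['#'] 1) 0 [])
      else line
    if PySem.Chars.endswith line ['\\'] = true then
      (current ++ PySem.List.slice line none (some (-1)) ++ [' '], st.2)
    else ([], st.2 ++ [String.ofList (PySem.Chars.strip (current ++ line))])

-- One cleaning step of A, as an Option (proof-only helper).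
def pvClean1 (raw : List Char) : Option (List Char) :=
  let s := PySem.Chars.strip raw
  if s = [] ∨ PySem.Chars.startswith s ['#'] = true then none
  else some (if PySem.Chars.isIn ['#'] s = true then
      PySem.Chars.rstrip (PySem.List.pyGetD (PySem.Chars.splitOnMax s ['#'] 1) 0 [])
    else s)

theorem pvAStep_eq (st : List Char × List String) (raw : List Char) :
    pvAStep st raw = (match pvClean1 raw with
      | none => st
      | some l =>
        if PySem.Chars.endswith l ['\\'] = true then
          (st.1 ++ PySem.List.slice l none (some (-1)) ++ [' '], st.2)
        else ([], st.2 ++ [String.ofList (PySem.Chars.strip (st.1 ++ l))])) := by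
  simp only [pvAStep, pvClean1]
  split_ifs <;> simp [*]

theorem pvCleanPass_cons (raw : List Char) (rest : List (List Char)) :
    pvCleanPass (raw :: rest) = (match pvClean1 raw with
      | none => pvCleanPass rest
      | some l => l :: pvCleanPass rest) := by
  simp only [pvCleanPass, pvClean1]
  by_cases h : PySem.Chars.strip raw = [] ∨ PySem.Chars.startswith (PySem.Chars.strip raw) ['#'] = true
  · rw [if_pos h, if_neg (by tauto)]
  · rw [if_neg h, if_pos (by tauto)]

-- Invariant: A's fold over the raw lines (+ final flush) = prior output ++ B's recursion on the cleaned lines.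
theorem pvA_fold_eq (raws : List (List Char)) (cur : List Char) (acc : List String) :
    (let res := raws.foldl pvAStep (cur, acc);
     if PySem.Chars.strip res.1 ≠ [] then res.2 ++ [String.ofList (PySem.Chars.strip res.1)] else res.2)
    = acc ++ pvAssemble (pvCleanPass raws) cur := by
  induction raws generalizing cur acc with
  | nil =>
    simp only [List.foldl_nil, pvCleanPass, pvAssemble]
    split_ifs <;> simp
  | cons raw rest ih =>
    simp only [List.foldl_cons, pvAStep_eq, pvCleanPass_cons]
    cases hc : pvClean1 raw with
    | none => exact ih cur acc
    | some l =>
      by_cases h2 : PySem.Chars.endswith l ['\\'] = true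
      · simp only [if_pos h2, pvAssemble]
        exact ih _ acc
      · simp only [if_neg h2, pvAssemble]
        rw [ih [] (acc ++ [String.ofList (PySem.Chars.strip (cur ++ l))])]
        simp

-- ===== VERDICT (by name: the statement is the Claim_ definition above) =====
theorem logical_lines_py_spec : Claim_equal_logical_lines_py := by
  intro block _
  unfold Spec_logical_lines_py logical_lines_py logical_lines_py_alt
  exact pvA_fold_eq (PySem.Chars.splitlines block.toList) [] []
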